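-- pv_equiv track=rewrite | github.com/sewilliams-ai/spark-realtime-chatbot | server.py | _handoff_summary
-- ===== SOURCE A (Python) =====
-- from typing import Any, Dict, List, Optional
--
-- def _handoff_visible_messages(history: List[Dict[str, str]]) -> List[Dict[str, str]]:
--     return [
--         {"role": msg["role"], "content": msg["content"]}
--         for msg in history
--         if msg.get("role") in {"user", "assistant"} and msg.get("content")
--     ]
--
-- def _handoff_summary(history: List[Dict[str, str]]) -> str:
--     visible = _handoff_visible_messages(history)
--     user_turns = [msg["content"] for msg in visible if msg["role"] == "user"]
--     if not visible:
--         return "No completed conversation yet."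
--     if user_turns:
--         last_user = user_turns[-1]
--         return f"{len(visible)} messages. Last topic: {last_user[:120]}"
--     return f"{len(visible)} messages ready to continue."
-- ===== SOURCE B (Python) =====
-- def _handoff_summary(history):
--     visible_count = 0
--     last_user = None
--     for msg in history:
--         if msg.get("role") in {"user", "assistant"} and msg.get("content"):
--             visible_count += 1
--             if msg["role"] == "user":
--                 last_user = msg["content"]
--     if visible_count == 0:
--         return "No completed conversation yet."
--     if last_user is not None:
--         return f"{visible_count} messages. Last topic: {last_user[:120]}"
--     return f"{visible_count} messages ready to continue."
-- ===== Notes on version B (the rewrite author's own statement) =====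
-- stated objective: simpler
-- what changed: Replaces the two intermediate lists (visible messages rebuilt as dicts, then the user-turn contents) with a single pass over history maintaining a count and the last user content, branching once at the end.
import Mathlib
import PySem

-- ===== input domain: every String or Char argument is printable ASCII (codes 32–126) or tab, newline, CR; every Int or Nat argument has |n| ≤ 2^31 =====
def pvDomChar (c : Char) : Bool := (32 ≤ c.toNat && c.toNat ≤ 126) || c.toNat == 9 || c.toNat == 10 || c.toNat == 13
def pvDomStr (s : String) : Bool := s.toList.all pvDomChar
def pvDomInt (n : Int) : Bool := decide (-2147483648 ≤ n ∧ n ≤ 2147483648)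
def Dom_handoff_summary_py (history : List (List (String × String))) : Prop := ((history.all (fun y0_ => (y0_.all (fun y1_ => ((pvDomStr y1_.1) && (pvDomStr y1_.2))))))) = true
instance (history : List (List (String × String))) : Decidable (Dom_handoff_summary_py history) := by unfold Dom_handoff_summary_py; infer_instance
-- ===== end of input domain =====

-- B replaces A's two intermediate lists by a single accumulator pass (count + last user content); objective: simpler, same return value.

-- ===== PORT A =====
-- msg.get(k) on an association-list dict (first-match lookup)
def pvGetK (m : List (String × String)) (k : String) : Option String :=
  (PySem.Dict.mk m).get? k

-- the guard `msg.get("role") in {"user","assistant"} and msg.get("content")` (shared verbatim by both Pythons)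
def pvKeep (m : List (String × String)) : Bool :=
  (match pvGetK m "role" with
   | some r => r == "user" || r == "assistant"
   | none => false)
  &&
  (match pvGetK m "content" with
   | some c => c != ""
   | none => false)

-- msg["role"] / msg["content"]: only reached when pvKeep guarantees the key is present, so getD "" is exact there
def pvRole (m : List (String × String)) : String := (pvGetK m "role").getD ""
def pvContent (m : List (String × String)) : String := (pvGetK m "content").getD ""

def handoff_visible_messages_py (history : List (List (String × String))) : List (List (String × String)) :=
  (history.filter pvKeep).map (fun m => [("role", pvRole m), ("content", pvContent m)])

def handoff_summary_py (history : List (List (String × String))) : String :=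
  let visible := handoff_visible_messages_py history
  let user_turns := (visible.filter (fun m => pvRole m == "user")).map pvContent
  if visible = [] then "No completed conversation yet."
  else
    match PySem.List.pyGet? user_turns (-1) with
    | some last_user =>
        PySem.Int.toStr (visible.length : Int) ++ " messages. Last topic: " ++ PySem.Str.slice last_user none (some 120)
    | none => PySem.Int.toStr (visible.length : Int) ++ " messages ready to continue."

-- ===== PORT B =====
def pvStep (st : Int × Option String) (msg : List (String × String)) : Int × Option String :=
  if pvKeep msg then
    (st.1 + 1, if pvRole msg == "user" then some (pvContent msg) else st.2)
  else st

def handoff_summary_py_alt (history : List (List (String × String))) : String :=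
  let st := history.foldl pvStep ((0 : Int), (none : Option String))
  if st.1 == 0 then "No completed conversation yet."
  else
    match st.2 with
    | some last_user =>
        PySem.Int.toStr st.1 ++ " messages. Last topic: " ++ PySem.Str.slice last_user none (some 120)
    | none => PySem.Int.toStr st.1 ++ " messages ready to continue."

-- ===== PRECONDITION & SPEC =====
def Spec_handoff_summary_py (history : List (List (String × String))) (out : String) : Prop := out = handoff_summary_py_alt history
instance (history : List (List (String × String))) (out : String) : Decidable (Spec_handoff_summary_py history out) := by unfold Spec_handoff_summary_py; infer_instance

-- ===== CLAIM (what is proved, stated in full; the proofs are below) =====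
def Claim_equal_handoff_summary_py : Prop := ∀ (history : List (List (String × String))), Dom_handoff_summary_py history → Spec_handoff_summary_py history (handoff_summary_py history)

-- ===== LEMMAS AND PROOFS =====

def pvUserTurns (visible : List (List (String × String))) : List String :=
  (visible.filter (fun m => pvRole m == "user")).map pvContent

theorem pv_or_getLast_cons {α : Type} (a : α) (xs : List α) (l : Option α) :
    ((a :: xs).getLast?).or l = (xs.getLast?).or (some a) := by
  cases xs with
  | nil => simp
  | cons b bs =>
    rw [List.getLast?_cons_cons]
    obtain ⟨u, hu⟩ := Option.isSome_iff_exists.mp (by simp [List.getLast?_isSome] : ((b :: bs).getLast?).isSome = true)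
    simp [hu]

theorem pv_role_mk (m : List (String × String)) :
    pvRole [("role", pvRole m), ("content", pvContent m)] = pvRole m := by
  simp [pvRole, pvGetK, PySem.Dict.get?_mk_cons]

theorem pv_content_mk (m : List (String × String)) :
    pvContent [("role", pvRole m), ("content", pvContent m)] = pvContent m := by
  simp [pvContent, pvGetK, PySem.Dict.get?_mk_cons]

theorem pv_fold (history : List (List (String × String))) :
    ∀ (c : Int) (l : Option String),
      history.foldl pvStep (c, l) =
        (c + (handoff_visible_messages_py history).length,
         ((pvUserTurns (handoff_visible_messages_py history)).getLast?).or l) := by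
  induction history with
  | nil => intro c l; simp [handoff_visible_messages_py, pvUserTurns]
  | cons m t ih =>
    intro c l
    rw [List.foldl_cons]
    by_cases hk : pvKeep m
    · rw [show pvStep (c, l) m = (c + 1, if pvRole m == "user" then some (pvContent m) else l)
        from by simp [pvStep, hk]]
      rw [ih]
      have hvis : handoff_visible_messages_py (m :: t) =
          [("role", pvRole m), ("content", pvContent m)] :: handoff_visible_messages_py t := by
        simp [handoff_visible_messages_py, hk]
      rw [hvis]
      have hut : pvUserTurns ([("role", pvRole m), ("content", pvContent m)] :: handoff_visible_messages_py t) =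
          if pvRole m == "user" then pvContent m :: pvUserTurns (handoff_visible_messages_py t)
          else pvUserTurns (handoff_visible_messages_py t) := by
        by_cases hr : pvRole m == "user" <;>
          simp [pvUserTurns, pv_role_mk, pv_content_mk, hr]
      rw [hut]
      by_cases hr : pvRole m == "user"
      · simp only [hr, if_true, List.length_cons, pv_or_getLast_cons, Prod.mk.injEq]
        constructor
        · push_cast; ring
        · trivial
      · simp only [hr, List.length_cons, Prod.mk.injEq, Bool.false_eq_true, if_false]
        constructor
        · push_cast; ring
        · trivial
    · rw [show pvStep (c, l) m = (c, l) from by simp [pvStep, hk]]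
      rw [ih]
      have hvis : handoff_visible_messages_py (m :: t) = handoff_visible_messages_py t := by
        simp [handoff_visible_messages_py, hk]
      rw [hvis]

-- ===== VERDICT (by name: the statement is the Claim_ definition above) =====
theorem handoff_summary_py_spec : Claim_equal_handoff_summary_py := by
  intro history _
  unfold Spec_handoff_summary_py handoff_summary_py handoff_summary_py_alt
  rw [pv_fold]
  simp only [PySem.List.pyGet?_neg_one]
  by_cases hv : handoff_visible_messages_py history = []
  · simp [hv]
  · have hlen : (((handoff_visible_messages_py history).length : Int) == 0) = false := by
      have hne : (handoff_visible_messages_py history).length ≠ 0 := by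
        simpa [List.length_eq_zero_iff] using hv
      simp only [beq_eq_false_iff_ne, ne_eq, Nat.cast_eq_zero]
      exact hne
    simp only [hv, if_false, zero_add, hlen, Bool.false_eq_true, Option.or_none, pvUserTurns]
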